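-- pv_equiv track=rewrite | github.com/anders-ahsman/advent-of-code | day6/main.py | closest_coordinate
-- ===== SOURCE A (Python) =====
-- def closest_coordinate(point, coordinates):
--     coords_with_dists = [(c, manhattan_distance(c, point)) for c in coordinates]
--     dists = [manhattan_distance(c, point) for c in coordinates]
--     closest_dist = min(dists)
--     if dists.count(closest_dist) == 1:
--         closest_coord = [c[0] for c in coords_with_dists if c[1] == closest_dist][0]
--         return closest_coord
--     return None
--
-- def manhattan_distance(coord_a, coord_b):
--     return abs(coord_a[0] - coord_b[0]) + abs(coord_a[1] - coord_b[1])
-- ===== SOURCE B (Python) =====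
-- def closest_coordinate(point, coordinates):
--     if not coordinates:
--         raise ValueError('closest_coordinate() arg is an empty sequence')
--     it = iter(coordinates)
--     best = next(it)
--     best_dist = manhattan_distance(best, point)
--     count = 1
--     for c in it:
--         d = manhattan_distance(c, point)
--         if d < best_dist:
--             best_dist, best, count = d, c, 1
--         elif d == best_dist:
--             count += 1
--     return best if count == 1 else None
--
-- def manhattan_distance(coord_a, coord_b):
--     return abs(coord_a[0] - coord_b[0]) + abs(coord_a[1] - coord_b[1])
-- ===== Notes on version B (the rewrite author's own statement) =====
-- stated objective: alternative
-- what changed: Replaced A's four passes (two distance lists, min, count, filter-index) with a single fold over the coordinates maintaining best distance, best coordinate and a tie counter.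
import Mathlib
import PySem

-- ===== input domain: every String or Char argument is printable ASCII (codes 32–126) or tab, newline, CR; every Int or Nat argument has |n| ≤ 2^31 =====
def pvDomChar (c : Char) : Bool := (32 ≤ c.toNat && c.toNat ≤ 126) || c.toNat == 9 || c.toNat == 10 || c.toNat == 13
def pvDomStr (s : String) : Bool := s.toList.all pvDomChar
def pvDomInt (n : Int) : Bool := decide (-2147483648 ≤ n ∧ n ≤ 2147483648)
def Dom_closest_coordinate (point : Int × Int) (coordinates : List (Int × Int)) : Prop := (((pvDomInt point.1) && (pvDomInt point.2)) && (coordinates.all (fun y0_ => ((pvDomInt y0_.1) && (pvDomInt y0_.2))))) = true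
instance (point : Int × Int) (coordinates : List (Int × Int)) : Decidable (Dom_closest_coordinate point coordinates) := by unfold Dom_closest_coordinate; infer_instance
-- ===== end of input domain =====

-- B replaces A's four passes (two distance lists, min, count, filter-index) with one
-- fold keeping best distance, best coordinate and a tie counter.

-- ===== PORT A =====
def manhattanDistance (coord_a coord_b : Int × Int) : Int :=
  |coord_a.1 - coord_b.1| + |coord_a.2 - coord_b.2|

def closest_coordinate (point : Int × Int) (coordinates : List (Int × Int)) : Option (Int × Int) :=
  let coords_with_dists := coordinates.map (fun c => (c, manhattanDistance c point))
  let dists := coordinates.map (fun c => manhattanDistance c point)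
  match PySem.List.min? dists (fun y => y) with
  | none => none   -- min([]) raises ValueError; excluded by Pre_
  | some closest_dist =>
    if PySem.List.count dists closest_dist == 1 then
      -- [c[0] for c in coords_with_dists if c[1] == closest_dist][0]
      -- ([0] can only raise IndexError on a list whose minimum is not attained, impossible)
      PySem.List.pyGet? ((coords_with_dists.filter (fun c => c.2 == closest_dist)).map (fun c => c.1)) 0
    else none

-- ===== PORT B =====
-- the 'for c in it' loop of Source B over the remaining coordinates, with state (best_dist, best, count)
def altLoop (point : Int × Int) : List (Int × Int) → Int → (Int × Int) → Nat → Option (Int × Int)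
  | [], _, best, count => if count == 1 then some best else none
  | c :: rest, bestDist, best, count =>
    let d := manhattanDistance c point
    if d < bestDist then altLoop point rest d c 1
    else if d == bestDist then altLoop point rest bestDist best (count + 1)
    else altLoop point rest bestDist best count

def closest_coordinate_alt (point : Int × Int) (coordinates : List (Int × Int)) : Option (Int × Int) :=
  match coordinates with
  | [] => none   -- Source B raises ValueError here; excluded by Pre_
  | c :: rest => altLoop point rest (manhattanDistance c point) c 1

-- ===== PRECONDITION & SPEC =====
-- Pre_ excludes only the empty coordinate list, on which A raises ValueError (min([])).
def Pre_closest_coordinate (point : Int × Int) (coordinates : List (Int × Int)) : Prop :=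
  coordinates ≠ []
instance (point : Int × Int) (coordinates : List (Int × Int)) : Decidable (Pre_closest_coordinate point coordinates) := by unfold Pre_closest_coordinate; infer_instance

def pvWitness_closest_coordinate : (Int × Int) × (List (Int × Int)) := ((0, 0), [(1, 2), (3, 0)])

def Spec_closest_coordinate (point : Int × Int) (coordinates : List (Int × Int)) (out : Option (Int × Int)) : Prop := out = closest_coordinate_alt point coordinates
instance (point : Int × Int) (coordinates : List (Int × Int)) (out : Option (Int × Int)) : Decidable (Spec_closest_coordinate point coordinates out) := by unfold Spec_closest_coordinate; infer_instance

-- ===== CLAIM (what is proved, stated in full; the proofs are below) =====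
def Claim_equal_closest_coordinate : Prop := ∀ (point : Int × Int) (coordinates : List (Int × Int)), Dom_closest_coordinate point coordinates → Pre_closest_coordinate point coordinates → Spec_closest_coordinate point coordinates (closest_coordinate point coordinates)

-- ===== LEMMAS AND PROOFS =====

-- closed form for altLoop's result, in terms of whole-list quantities
def altClosed (point : Int × Int) (l : List (Int × Int)) (d0 : Int) (c0 : Int × Int) (cnt : Nat) : Option (Int × Int) :=
  let f := fun c => manhattanDistance c point
  let m := (l.map f).foldl min d0
  let K := (if d0 = m then cnt else 0) + (l.map f).count m
  if K = 1 then (if d0 = m then some c0 else (l.filter (fun c => f c == m)).head?) else none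

lemma foldl_min_le_init (l : List Int) (a : Int) : l.foldl min a ≤ a := by
  induction l generalizing a with
  | nil => simp
  | cons x t ih => exact le_trans (ih (min a x)) (min_le_left a x)

lemma altLoop_eq_closed (point : Int × Int) (l : List (Int × Int)) :
    ∀ (d0 : Int) (c0 : Int × Int) (cnt : Nat),
      altLoop point l d0 c0 cnt = altClosed point l d0 c0 cnt := by
  induction l with
  | nil => intro d0 c0 cnt; simp [altLoop, altClosed]
  | cons c rest ih =>
    intro d0 c0 cnt
    simp only [altLoop, altClosed, List.map_cons, List.foldl_cons, List.count_cons,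
      List.filter_cons]
    by_cases h1 : manhattanDistance c point < d0
    · rw [if_pos h1, ih, altClosed]
      simp only [show min d0 (manhattanDistance c point) = manhattanDistance c point from
        min_eq_right (le_of_lt h1)]
      have hmle := foldl_min_le_init (rest.map (fun c => manhattanDistance c point))
        (manhattanDistance c point)
      generalize hg : (rest.map (fun c => manhattanDistance c point)).foldl min
        (manhattanDistance c point) = m at hmle ⊢
      have hne : ¬ d0 = m := by omega
      by_cases hdm : manhattanDistance c point = m
      · simp [hne, hdm, Nat.add_comm]
      · simp [hne, hdm]
    · rw [if_neg h1]
      by_cases h2 : manhattanDistance c point = d0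
      · rw [if_pos (by simpa using h2), ih, altClosed]
        simp only [show min d0 (manhattanDistance c point) = d0 from min_eq_left (by omega)]
        generalize hg : (rest.map (fun c => manhattanDistance c point)).foldl min d0 = m
        by_cases h3 : d0 = m
        · simp only [h2, if_pos h3, beq_iff_eq]
          generalize (rest.map (fun c => manhattanDistance c point)).count m = K
          rw [show cnt + (K + 1) = cnt + 1 + K from by omega]
        · have hdm : ¬ manhattanDistance c point = m := h2 ▸ h3
          simp [h3, hdm]
      · rw [if_neg (by simpa using h2), ih, altClosed]
        simp only [show min d0 (manhattanDistance c point) = d0 from min_eq_left (by omega)]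
        have hmle := foldl_min_le_init (rest.map (fun c => manhattanDistance c point)) d0
        generalize hg : (rest.map (fun c => manhattanDistance c point)).foldl min d0 = m
          at hmle ⊢
        have hdm : ¬ manhattanDistance c point = m := by omega
        simp [hdm]

theorem closest_coordinate_spec : Claim_equal_closest_coordinate := by
  intro point coordinates _ hpre
  unfold Spec_closest_coordinate
  match coordinates with
  | [] => exact absurd rfl hpre
  | c :: rest =>
    show closest_coordinate point (c :: rest) = altLoop point rest (manhattanDistance c point) c 1
    rw [altLoop_eq_closed, altClosed]
    simp only [closest_coordinate, List.map_cons, PySem.List.min?_id_cons,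
      PySem.List.count_eq, List.count_cons]
    have hfilter : ∀ m : Int,
        ((((c, manhattanDistance c point) ::
              rest.map (fun x => (x, manhattanDistance x point))).filter
            (fun p => p.2 == m)).map (fun p => p.1))
          = (c :: rest).filter (fun x => manhattanDistance x point == m) := by
      intro m
      rw [show ((c, manhattanDistance c point) ::
            rest.map (fun x => (x, manhattanDistance x point)))
          = (c :: rest).map (fun x => (x, manhattanDistance x point)) from rfl,
        List.filter_map, List.map_map]
      simp [Function.comp_def]
    rw [hfilter]
    generalize hg : (rest.map (fun c => manhattanDistance c point)).foldl min
      (manhattanDistance c point) = m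
    by_cases hdm : manhattanDistance c point = m
    · simp [hdm, PySem.List.pyGet?_zero, Nat.add_comm]
    · simp [hdm, PySem.List.pyGet?_zero, List.head?_eq_getElem?]
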